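-- pv_equiv track=rewrite | github.com/masonacevedo/leetcode_problems_new | 131_Palindrome_Partitioning.py | generateAllPartitions
-- ===== SOURCE A (Python) =====
-- import copy
--
-- def generateAllPartitions(s):
--     if len(s) == 0:
--         return []
--     elif len(s) == 1:
--         return [[s]]
--     elif len(s) == 2:
--         return [[s[0], s[1]], [s]]
--
--     afterFirst = generateAllPartitions(s[1:])
--
--     ans = []
--     firstChar = s[0]
--     for p in afterFirst:
--         firstCharSeparate = [firstChar] + copy.deepcopy(p)
--         firstCharJoin = [firstChar + copy.deepcopy(p[0])] + copy.deepcopy(p[1:])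
--         ans.append(firstCharSeparate)
--         ans.append(firstCharJoin)
--     return ans
-- ===== SOURCE B (Python) =====
-- def generateAllPartitions(s):
--     if not s:
--         return []
--     res = []
--     for k in range(1 << (len(s) - 1)):
--         parts = []
--         cur = s[0]
--         for i, ch in enumerate(s[1:]):
--             if (k >> i) & 1 == 0:
--                 parts.append(cur)
--                 cur = ch
--             else:
--                 cur += ch
--         parts.append(cur)
--         res.append(parts)
--     return res
-- ===== Notes on version B (the rewrite author's own statement) =====
-- stated objective: alternative
-- what changed: Replaces A's recursion on the tail (which doubles the tail's partition list, pairing each tail partition with a 'separate' and a 'join' variant using deepcopies) by a single iterative enumeration of the 2^(n-1) cut bitmasks, building each partition in one left-to-right scan (cut after gap i iff bit i of k is 0), which reproduces A's exact order.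
import Mathlib
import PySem

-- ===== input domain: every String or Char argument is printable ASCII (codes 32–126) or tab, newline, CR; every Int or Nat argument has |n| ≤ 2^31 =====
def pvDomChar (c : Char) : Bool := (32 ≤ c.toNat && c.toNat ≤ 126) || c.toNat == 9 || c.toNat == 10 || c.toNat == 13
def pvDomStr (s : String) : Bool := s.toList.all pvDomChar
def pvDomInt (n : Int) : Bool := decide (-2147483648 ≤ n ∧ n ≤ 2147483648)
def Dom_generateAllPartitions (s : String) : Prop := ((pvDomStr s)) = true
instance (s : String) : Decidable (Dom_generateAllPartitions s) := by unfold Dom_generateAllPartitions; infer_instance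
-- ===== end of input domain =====

-- B replaces A's recursion (which doubles the partition list of the tail, with deepcopies)
-- by a single iterative enumeration of the 2^(n-1) cut bitmasks; objective: alternative.

-- ===== PORT A =====
-- Python strings are represented as List Char; String.mk is applied once at the top.
-- genAC is A's recursion, step for step (ans.append twice per p → acc ++ [sep, join]).
def genAC : List Char → List (List (List Char))
  | [] => []
  | [c] => [[[c]]]
  | [c, d] => [[[c], [d]], [[c, d]]]
  | c :: d :: e :: rest =>
      let afterFirst := genAC (d :: e :: rest)
      afterFirst.foldl
        (fun ans p => ans ++ [[c] :: p, (c :: p.headD []) :: p.drop 1]) []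

def generateAllPartitions (s : String) : List (List String) :=
  (genAC s.toList).map (fun p => p.map String.mk)

-- ===== PORT B =====
-- one row of B's outer loop: the inner 'for i, ch in enumerate(s[1:])' fold
def genBRow (cs : List Char) (k : Nat) : List (List Char) :=
  let st := ((cs.drop 1).zipIdx).foldl
    (fun (pc : List (List Char) × List Char) (chi : Char × Nat) =>
      if (k >>> chi.2) % 2 = 0 then (pc.1 ++ [pc.2], [chi.1])
      else (pc.1, pc.2 ++ [chi.1]))
    ([], [cs.headD ' '])
  st.1 ++ [st.2]

def genBC (cs : List Char) : List (List (List Char)) :=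
  if cs.length = 0 then []
  else (List.range (2 ^ (cs.length - 1))).foldl (fun res k => res ++ [genBRow cs k]) []

def generateAllPartitions_alt (s : String) : List (List String) :=
  (genBC s.toList).map (fun p => p.map String.mk)

-- ===== PRECONDITION & SPEC =====
def Spec_generateAllPartitions (s : String) (out : List (List String)) : Prop := out = generateAllPartitions_alt s
instance (s : String) (out : List (List String)) : Decidable (Spec_generateAllPartitions s out) := by unfold Spec_generateAllPartitions; infer_instance

-- ===== CLAIM (what is proved, stated in full; the proofs are below) =====
def Claim_equal_generateAllPartitions : Prop := ∀ (s : String), Dom_generateAllPartitions s → Spec_generateAllPartitions s (generateAllPartitions s)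

-- ===== LEMMAS AND PROOFS =====

-- reference recursive form of one bitmask row
def rowSpec (cur : List Char) : List Char → Nat → List (List Char)
  | [], _ => [cur]
  | ch :: rest, k =>
      if k % 2 = 0 then cur :: rowSpec [ch] rest (k / 2)
      else rowSpec (cur ++ [ch]) rest (k / 2)

lemma genBRow_loop (rest : List Char) :
    ∀ (n : Nat) (k : Nat) (parts : List (List Char)) (cur : List Char),
    ((rest.zipIdx n).foldl
        (fun (pc : List (List Char) × List Char) (chi : Char × Nat) =>
          if (k >>> chi.2) % 2 = 0 then (pc.1 ++ [pc.2], [chi.1])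
          else (pc.1, pc.2 ++ [chi.1]))
        (parts, cur)).1 ++ [((rest.zipIdx n).foldl
        (fun (pc : List (List Char) × List Char) (chi : Char × Nat) =>
          if (k >>> chi.2) % 2 = 0 then (pc.1 ++ [pc.2], [chi.1])
          else (pc.1, pc.2 ++ [chi.1]))
        (parts, cur)).2] = parts ++ rowSpec cur rest (k >>> n) := by
  induction rest with
  | nil => intro n k parts cur; simp [rowSpec]
  | cons ch rest ih =>
      intro n k parts cur
      simp only [List.zipIdx_cons, List.foldl_cons]
      by_cases h : (k >>> n) % 2 = 0
      · simp only [h, rowSpec, if_true]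
        rw [ih (n + 1) k (parts ++ [cur]) [ch]]
        have : k >>> (n + 1) = (k >>> n) / 2 := by
          simp [Nat.shiftRight_succ]
        simp [this]
      · simp only [if_neg h, rowSpec]
        rw [ih (n + 1) k parts (cur ++ [ch])]
        have : k >>> (n + 1) = (k >>> n) / 2 := by
          simp [Nat.shiftRight_succ]
        simp [this]

lemma genBRow_eq_rowSpec (c : Char) (rest : List Char) (k : Nat) :
    genBRow (c :: rest) k = rowSpec [c] rest k := by
  have h := genBRow_loop rest 0 k [] [c]
  simpa [genBRow] using h

-- prepending a character to the current segment prepends it to the head of the row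
lemma rowSpec_cons_cur (x : Char) (rest : List Char) :
    ∀ (cur : List Char) (k : Nat),
    rowSpec (x :: cur) rest k =
      (x :: (rowSpec cur rest k).headD []) :: (rowSpec cur rest k).drop 1 := by
  induction rest with
  | nil => intro cur k; simp [rowSpec]
  | cons ch rest ih =>
      intro cur k
      simp only [rowSpec]
      by_cases h : k % 2 = 0
      · simp [h]
      · simp only [if_neg h]
        have := ih (cur ++ [ch]) (k / 2)
        simpa using this

lemma pvRangeTwoMul (N : Nat) :
    List.range (2 * N) = (List.range N).flatMap (fun j => [2 * j, 2 * j + 1]) := by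
  induction N with
  | zero => simp
  | succ N ih =>
      have : 2 * (N + 1) = (2 * N) + 1 + 1 := by ring
      rw [this, List.range_succ, List.range_succ, List.range_succ, ih]
      simp [List.flatMap_append]

lemma foldl_pairs {α β : Type} (f g : α → β) :
    ∀ (l : List α) (acc : List β),
    l.foldl (fun ans p => ans ++ [f p, g p]) acc = acc ++ l.flatMap (fun p => [f p, g p]) := by
  intro l
  induction l with
  | nil => intro acc; simp
  | cons p l ih => intro acc; simp [ih]

-- A's recursive step, valid for any tail of length ≥ 1
lemma genAC_cons (c : Char) (rest : List Char) (h : rest ≠ []) :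
    genAC (c :: rest) =
      (genAC rest).flatMap (fun p => [[c] :: p, (c :: p.headD []) :: p.drop 1]) := by
  match rest, h with
  | [d], _ => simp [genAC]
  | d :: e :: rest', _ =>
      show genAC (c :: d :: e :: rest') = _
      rw [genAC]
      exact foldl_pairs _ _ _ []

-- the core equivalence: A's list equals the bitmask-indexed rows, in order
lemma genAC_eq_rows :
    ∀ (cs : List Char), cs ≠ [] →
    genAC cs = (List.range (2 ^ (cs.length - 1))).map (fun k => genBRow cs k) := by
  intro cs
  induction cs with
  | nil => intro h; exact absurd rfl h
  | cons c rest ih =>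
      intro _
      cases rest with
      | nil =>
          simp [genAC, genBRow_eq_rowSpec, rowSpec]
      | cons d rest' =>
          have hrest : (d :: rest') ≠ [] := by simp
          rw [genAC_cons c _ hrest, ih hrest]
          have hlen : (c :: d :: rest').length - 1 = (d :: rest').length := by simp
          have hpow : 2 ^ ((c :: d :: rest').length - 1)
              = 2 * 2 ^ ((d :: rest').length - 1) := by
            simp [pow_succ, Nat.mul_comm]
          rw [hpow, pvRangeTwoMul, List.map_flatMap, List.flatMap_map]
          apply List.flatMap_congr  -- pointwise equality of the two-element blocks
          intro j _
          have hb1 : genBRow (c :: d :: rest') (2 * j) = [c] :: genBRow (d :: rest') j := by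
            rw [genBRow_eq_rowSpec, genBRow_eq_rowSpec]
            simp [rowSpec]
          have hb2 : genBRow (c :: d :: rest') (2 * j + 1)
              = (c :: (genBRow (d :: rest') j).headD []) :: (genBRow (d :: rest') j).drop 1 := by
            rw [genBRow_eq_rowSpec, genBRow_eq_rowSpec]
            have hodd : (2 * j + 1) % 2 = 1 := by omega
            have hdiv : (2 * j + 1) / 2 = j := by omega
            simp only [rowSpec, hodd, hdiv]
            simp only [if_neg (by omega : ¬ (1 = 0))]
            have := rowSpec_cons_cur c rest' [d] j
            simpa using this
          simp [hb1, hb2]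

lemma genAC_eq_genBC (cs : List Char) : genAC cs = genBC cs := by
  cases cs with
  | nil => simp [genAC, genBC]
  | cons c rest =>
      rw [genBC]
      simp only [List.length_cons, if_neg (by simp : ¬ (rest.length + 1 = 0))]
      rw [PySem.List.foldl_append_singleton_eq_map]
      simpa using genAC_eq_rows (c :: rest) (by simp)

-- ===== VERDICT (by name: the statement is the Claim_ definition above) =====
theorem generateAllPartitions_spec : Claim_equal_generateAllPartitions := by
  intro s _
  unfold Spec_generateAllPartitions generateAllPartitions generateAllPartitions_alt
  rw [genAC_eq_genBC]
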